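-- pv_equiv track=rewrite | github.com/debdattasarkar/DSA | 2. GFG/0. All/1. Arrays/(M) Minimum days to make M bouquets/py_sol.py | minDaysBloom
-- ===== SOURCE A (Python) =====
-- def minDaysBloom(arr, k, m):
--     # Code here
--     """
--     Binary search on day D with a linear feasibility check.
--     Time: O(n log(maxVal - minVal))
--     Space: O(1)
--     """
--     n = len(arr)
--     # Quick impossibility: not enough flowers overall
--     if m * k > n:
--         return -1
--
--     low, high = min(arr), max(arr)
--
--     def can_make(day):
--         """
--         Count how many bouquets we can form using
--         only flowers with bloom day <= 'day'.
--         Greedy O(n) scan; Space O(1).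
--         """
--         run = bouquets = 0
--         for a in arr:
--             if a <= day:
--                 run += 1
--                 if run == k:
--                     bouquets += 1
--                     run = 0  # consume exactly k adjacent in this bouquet
--                     if bouquets >= m:
--                         return True
--             else:
--                 run = 0
--         return False
--
--     ans = -1
--     while low <= high:
--         mid = (low + high) // 2
--         if can_make(mid):
--             ans = mid       # feasible -> try to minimize day
--             high = mid - 1
--         else:
--             low = mid + 1   # infeasible -> need more days
--     return ans
-- ===== SOURCE B (Python) =====
-- def minDaysBloom(arr, k, m):
--     # Same greedy feasibility check, but instead of binary searching the value
--     # range we scan the sorted distinct bloom values and return the first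
--     # feasible one (the answer, if any, is always a bloom value of arr).
--     n = len(arr)
--     if m * k > n:
--         return -1
--
--     def can_make(day):
--         run = bouquets = 0
--         for a in arr:
--             if a <= day:
--                 run += 1
--                 if run == k:
--                     bouquets += 1
--                     run = 0
--                     if bouquets >= m:
--                         return True
--             else:
--                 run = 0
--         return False
--
--     for day in sorted(set(arr)):
--         if can_make(day):
--             return day
--     return -1
-- ===== Notes on version B (the rewrite author's own statement) =====
-- stated objective: alternative
-- what changed: Replaces A's binary search over the bloom-value range by a linear scan over the sorted distinct bloom values, returning the first feasible one (the minimal feasible day is always a bloom value); the greedy adjacency check is kept.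
import Mathlib
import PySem

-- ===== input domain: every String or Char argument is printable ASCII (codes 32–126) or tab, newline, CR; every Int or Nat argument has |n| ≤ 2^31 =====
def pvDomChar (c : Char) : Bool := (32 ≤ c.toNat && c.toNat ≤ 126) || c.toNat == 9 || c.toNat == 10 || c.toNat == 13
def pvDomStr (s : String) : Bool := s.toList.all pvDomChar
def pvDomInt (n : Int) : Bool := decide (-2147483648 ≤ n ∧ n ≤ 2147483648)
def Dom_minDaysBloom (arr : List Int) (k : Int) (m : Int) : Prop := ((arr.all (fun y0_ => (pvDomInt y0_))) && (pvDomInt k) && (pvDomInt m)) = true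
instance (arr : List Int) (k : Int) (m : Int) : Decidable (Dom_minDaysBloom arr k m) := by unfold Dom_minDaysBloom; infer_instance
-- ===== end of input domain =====

-- B replaces A's binary search on the day-value range by a linear scan of the
-- sorted distinct bloom values (the minimal feasible day is always a bloom
-- value); the greedy feasibility check is the same. Objective: alternative.

-- ===== PORT A =====
-- the inner helper can_make(day) of A; the loop over arr with state (run, bouquets)
def canMakeA (k m day : Int) : List Int → Int → Int → Bool
  | [], _, _ => false
  | a :: rest, run, bouquets =>
    if a ≤ day then
      if run + 1 = k then
        if bouquets + 1 ≥ m then true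
        else canMakeA k m day rest 0 (bouquets + 1)
      else canMakeA k m day rest (run + 1) bouquets
    else canMakeA k m day rest 0 bouquets

-- A's while-loop (binary search) with state (low, high, ans)
def bsLoop (arr : List Int) (k m low high ans : Int) : Int :=
  if h : low ≤ high then
    let mid := PySem.Int.floordiv (low + high) 2
    if canMakeA k m mid arr 0 0 then bsLoop arr k m low (mid - 1) mid
    else bsLoop arr k m (mid + 1) high ans
  else ans
termination_by (high + 1 - low).toNat
decreasing_by
  · have hb := PySem.Int.floordiv_two_mid_bounds h
    omega
  · have hb := PySem.Int.floordiv_two_mid_bounds h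
    omega

def minDaysBloom (arr : List Int) (k : Int) (m : Int) : Int :=
  if m * k > (arr.length : Int) then -1
  else
    match PySem.List.min? arr (fun x => x), PySem.List.max? arr (fun x => x) with
    | some low, some high => bsLoop arr k m low high (-1)
    | _, _ => 0   -- unreachable: min([]) raises ValueError, excluded by Pre_

-- ===== PORT B =====
-- B's can_make(day): same greedy scan as A's helper
def canMakeB (k m day : Int) : List Int → Int → Int → Bool
  | [], _, _ => false
  | a :: rest, run, bouquets =>
    if a ≤ day then
      if run + 1 = k then
        if bouquets + 1 ≥ m then true
        else canMakeB k m day rest 0 (bouquets + 1)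
      else canMakeB k m day rest (run + 1) bouquets
    else canMakeB k m day rest 0 bouquets

-- B's for-loop over the sorted distinct values: first feasible day, else -1
def firstFeasible (arr : List Int) (k m : Int) : List Int → Int
  | [] => -1
  | d :: rest => if canMakeB k m d arr 0 0 then d else firstFeasible arr k m rest

def minDaysBloom_alt (arr : List Int) (k : Int) (m : Int) : Int :=
  if m * k > (arr.length : Int) then -1
  else firstFeasible arr k m (PySem.List.sorted (PySem.Set.ofList arr) (fun x => x) false)

-- ===== PRECONDITION & SPEC =====
-- Pre_ excludes only arr = [] with m*k ≤ 0, where A's min(arr) raises ValueError (B returns -1 there).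
def Pre_minDaysBloom (arr : List Int) (k : Int) (m : Int) : Prop :=
  arr = [] → m * k > 0
instance (arr : List Int) (k : Int) (m : Int) : Decidable (Pre_minDaysBloom arr k m) := by
  unfold Pre_minDaysBloom; infer_instance

def pvWitness_minDaysBloom : List Int × Int × Int := ([1, 10, 3, 10, 2], 3, 1)

def Spec_minDaysBloom (arr : List Int) (k : Int) (m : Int) (out : Int) : Prop := out = minDaysBloom_alt arr k m
instance (arr : List Int) (k : Int) (m : Int) (out : Int) : Decidable (Spec_minDaysBloom arr k m out) := by unfold Spec_minDaysBloom; infer_instance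

-- ===== CLAIM (what is proved, stated in full; the proofs are below) =====
def Claim_equal_minDaysBloom : Prop := ∀ (arr : List Int) (k : Int) (m : Int), Dom_minDaysBloom arr k m → Pre_minDaysBloom arr k m → Spec_minDaysBloom arr k m (minDaysBloom arr k m)
-- ===== LEMMAS AND PROOFS =====

-- number of bouquets the greedy scan forms (no early stop), starting with partial run `r`
def gCnt (k day : Int) : List Int → Int → Int
  | [], _ => 0
  | a :: rest, r =>
    if a ≤ day then
      if r + 1 = k then 1 + gCnt k day rest 0
      else gCnt k day rest (r + 1)
    else gCnt k day rest 0

lemma gCnt_nonneg (k day : Int) (l : List Int) (r : Int) : 0 ≤ gCnt k day l r := by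
  induction l generalizing r with
  | nil => simp [gCnt]
  | cons a rest ih => simp only [gCnt]; split_ifs <;> [linarith [ih 0]; exact ih _; exact ih 0]

lemma canMakeB_eq (k m day : Int) (l : List Int) (r b : Int) :
    canMakeB k m day l r b = canMakeA k m day l r b := by
  induction l generalizing r b with
  | nil => rfl
  | cons a rest ih => simp only [canMakeA, canMakeB, ih]

lemma canMakeA_char (k m day : Int) (l : List Int) (r b : Int) :
    canMakeA k m day l r b = true ↔ 1 ≤ gCnt k day l r ∧ m ≤ b + gCnt k day l r := by
  induction l generalizing r b with
  | nil => simp [canMakeA, gCnt]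
  | cons a rest ih =>
    simp only [canMakeA, gCnt]
    split_ifs with h1 h2 h3
    · have := gCnt_nonneg k day rest 0
      constructor
      · intro _; omega
      · intro _; rfl
    · rw [ih]; omega
    · rw [ih]
    · rw [ih]

lemma gCnt_zero_of_k_nonpos (k day : Int) (hk : k ≤ 0) (l : List Int) (r : Int) (hr : 0 ≤ r) :
    gCnt k day l r = 0 := by
  induction l generalizing r with
  | nil => rfl
  | cons a rest ih =>
    simp only [gCnt]
    split_ifs with h1 h2
    · omega
    · exact ih _ (by omega)
    · exact ih 0 (by omega)

-- partial-run monotonicity: a larger (still < k) head start never hurts, and helps by at most one bouquet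
lemma gCnt_run_mono (k day : Int) (l : List Int) :
    ∀ r r' : Int, 0 ≤ r → r ≤ r' → r' < k →
      gCnt k day l r ≤ gCnt k day l r' ∧ gCnt k day l r' ≤ 1 + gCnt k day l r := by
  induction l with
  | nil => intro r r' _ _ _; simp [gCnt]
  | cons a rest ih =>
    intro r r' h0 hle hlt
    simp only [gCnt]
    split_ifs with h1 h2 h3
    · -- r+1 = k, r'+1 = k
      omega
    · -- r+1 = k, r'+1 ≠ k : impossible (r = r')
      omega
    · -- r+1 ≠ k, r'+1 = k
      have h4 := ih 0 (r + 1) (by omega) (by omega) (by omega)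
      omega
    · -- neither
      exact ih (r + 1) (r' + 1) (by omega) (by omega) (by omega)
    · -- a > day
      omega

lemma gCnt_day_mono (k day day' : Int) (hd : day ≤ day') (l : List Int) :
    ∀ r r' : Int, 0 ≤ r → r ≤ r' → r' < k →
      gCnt k day l r ≤ gCnt k day' l r' := by
  induction l with
  | nil => intro r r' _ _ _; simp [gCnt]
  | cons a rest ih =>
    intro r r' h0 hle hlt
    simp only [gCnt]
    by_cases h1 : a ≤ day
    · have h1' : a ≤ day' := le_trans h1 hd
      simp only [if_pos h1, if_pos h1']
      split_ifs with h2 h3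
      · have := ih 0 0 (by omega) (by omega) (by omega); omega
      · omega
      · have h4 := ih (r + 1) (r + 1) (by omega) (by omega) (by omega)
        have h5 := gCnt_run_mono k day' rest 0 (r + 1) (by omega) (by omega) (by omega)
        omega
      · exact ih (r + 1) (r' + 1) (by omega) (by omega) (by omega)
    · simp only [if_neg h1]
      by_cases h1' : a ≤ day'
      · simp only [if_pos h1']
        split_ifs with h2
        · have := ih 0 0 (by omega) (by omega) (by omega); omega
        · exact ih 0 (r' + 1) (by omega) (by omega) (by omega)
      · simp only [if_neg h1']
        exact ih 0 0 (by omega) (by omega) (by omega)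

-- feasibility is monotone in the day
lemma canMakeA_mono (arr : List Int) (k m day day' : Int) (hd : day ≤ day')
    (h : canMakeA k m day arr 0 0 = true) : canMakeA k m day' arr 0 0 = true := by
  rw [canMakeA_char] at h ⊢
  by_cases hk : 1 ≤ k
  · have := gCnt_day_mono k day day' hd arr 0 0 (by omega) (by omega) (by omega)
    omega
  · rw [gCnt_zero_of_k_nonpos k day (by omega) arr 0 (by omega)] at h
    omega

lemma gCnt_pos_mem (k day : Int) (l : List Int) (r : Int) (h : 1 ≤ gCnt k day l r) :
    ∃ a ∈ l, a ≤ day := by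
  induction l generalizing r with
  | nil => simp [gCnt] at h
  | cons a rest ih =>
    simp only [gCnt] at h
    split_ifs at h with h1 h2
    · exact ⟨a, List.mem_cons_self, h1⟩
    · exact ⟨a, List.mem_cons_self, h1⟩
    · obtain ⟨x, hx, hxd⟩ := ih 0 h
      exact ⟨x, List.mem_cons_of_mem _ hx, hxd⟩

lemma gCnt_congr (k day day' : Int) (l : List Int)
    (h : ∀ a ∈ l, (a ≤ day ↔ a ≤ day')) (r : Int) :
    gCnt k day l r = gCnt k day' l r := by
  induction l generalizing r with
  | nil => rfl
  | cons a rest ih =>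
    have ha := h a List.mem_cons_self
    have hrest : ∀ x ∈ rest, (x ≤ day ↔ x ≤ day') := fun x hx => h x (List.mem_cons_of_mem _ hx)
    simp only [gCnt]
    by_cases h1 : a ≤ day
    · rw [if_pos h1, if_pos (ha.mp h1)]
      split_ifs with h2
      · rw [ih hrest]
      · rw [ih hrest]
    · rw [if_neg h1, if_neg (fun h' => h1 (ha.mpr h'))]
      exact ih hrest 0

-- any feasible day can be replaced by a feasible element of arr that is ≤ it
lemma feasible_elem (arr : List Int) (k m day : Int)
    (h : canMakeA k m day arr 0 0 = true) :
    ∃ a ∈ arr, a ≤ day ∧ canMakeA k m a arr 0 0 = true := by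
  rw [canMakeA_char] at h
  obtain ⟨x, hx, hxd⟩ := gCnt_pos_mem k day arr 0 h.1
  -- d' = max of the arr-elements ≤ day
  obtain ⟨d', hd'⟩ : ∃ d', PySem.List.max? (arr.filter (fun a => decide (a ≤ day))) (fun x => x) = some d' := by
    cases hmax : PySem.List.max? (arr.filter (fun a => decide (a ≤ day))) (fun x => x) with
    | none =>
      rw [PySem.List.max?_eq_none_iff] at hmax
      exact absurd hmax (by simp [List.filter_eq_nil_iff]; exact ⟨x, hx, hxd⟩)
    | some d' => exact ⟨d', rfl⟩
  have hmem := PySem.List.max?_mem hd'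
  have hmax := PySem.List.max?_isMax hd'
  simp only [List.mem_filter, decide_eq_true_eq] at hmem hmax
  refine ⟨d', hmem.1, hmem.2, ?_⟩
  rw [canMakeA_char]
  have hcong : ∀ a ∈ arr, (a ≤ day ↔ a ≤ d') := by
    intro a ha
    constructor
    · intro h'; exact hmax a ⟨ha, h'⟩
    · intro h'; exact le_trans h' hmem.2
  rw [← gCnt_congr k day d' arr hcong 0]
  exact h

-- binary search: when nothing in [low, high] is feasible, ans is returned unchanged
lemma bs_none (arr : List Int) (k m : Int) :
    ∀ (n : Nat) (low high ans : Int), (high + 1 - low).toNat ≤ n →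
      (∀ d, low ≤ d → d ≤ high → canMakeA k m d arr 0 0 = false) →
      bsLoop arr k m low high ans = ans := by
  intro n
  induction n with
  | zero =>
    intro low high ans hn _
    rw [bsLoop, dif_neg (by omega)]
  | succ n ih =>
    intro low high ans hn hnone
    rw [bsLoop]
    by_cases hlh : low ≤ high
    · rw [dif_pos hlh]
      have hb := PySem.Int.floordiv_two_mid_bounds hlh
      have hf := hnone _ hb.1 hb.2
      simp only [hf, Bool.false_eq_true, if_false]
      exact ih _ _ _ (by omega) (fun d h1 h2 => hnone d (by omega) h2)
    · rw [dif_neg hlh]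

-- binary search finds the globally minimal feasible day when it lies in [low, high]
lemma bs_min (arr : List Int) (k m : Int) :
    ∀ (n : Nat) (low high ans M : Int), (high + 1 - low).toNat ≤ n →
      low ≤ M → M ≤ high →
      canMakeA k m M arr 0 0 = true →
      (∀ d, d < M → canMakeA k m d arr 0 0 = false) →
      bsLoop arr k m low high ans = M := by
  intro n
  induction n with
  | zero =>
    intro low high ans M hn hlM hMh _ _
    omega
  | succ n ih =>
    intro low high ans M hn hlM hMh hM hmin
    have hlh : low ≤ high := by omega
    rw [bsLoop, dif_pos hlh]
    have hb := PySem.Int.floordiv_two_mid_bounds hlh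
    by_cases hfeas : canMakeA k m (PySem.Int.floordiv (low + high) 2) arr 0 0 = true
    · -- mid feasible, hence M ≤ mid
      have hMmid : M ≤ PySem.Int.floordiv (low + high) 2 := by
        by_contra hc
        have := hmin (PySem.Int.floordiv (low + high) 2) (by omega)
        rw [this] at hfeas
        exact absurd hfeas (by simp)
      simp only [hfeas, if_true]
      by_cases hcase : M ≤ PySem.Int.floordiv (low + high) 2 - 1
      · exact ih _ _ _ _ (by omega) hlM hcase hM hmin
      · have hMe : M = PySem.Int.floordiv (low + high) 2 := by omega
        rw [bs_none arr k m ((PySem.Int.floordiv (low + high) 2 - 1) + 1 - low).toNat low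
              (PySem.Int.floordiv (low + high) 2 - 1) (PySem.Int.floordiv (low + high) 2)
              (by omega) (fun d h1 h2 => hmin d (by omega))]
        omega
    · -- mid infeasible, hence mid < M
      have hmidM : PySem.Int.floordiv (low + high) 2 < M := by
        by_contra hc
        exact hfeas (canMakeA_mono arr k m M _ (by omega) hM)
      simp only [Bool.not_eq_true] at hfeas
      simp only [hfeas, Bool.false_eq_true, if_false]
      exact ih _ _ _ _ (by omega) (by omega) hMh hM hmin

lemma ff_none (arr : List Int) (k m : Int) (s : List Int)
    (h : ∀ d ∈ s, canMakeA k m d arr 0 0 = false) :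
    firstFeasible arr k m s = -1 := by
  induction s with
  | nil => rfl
  | cons d rest ih =>
    rw [firstFeasible, canMakeB_eq, h d List.mem_cons_self, if_neg (by simp)]
    exact ih (fun x hx => h x (List.mem_cons_of_mem _ hx))

lemma ff_min (arr : List Int) (k m : Int) (s : List Int) (M : Int)
    (hs : s.Pairwise (· < ·)) (hMs : M ∈ s)
    (hM : canMakeA k m M arr 0 0 = true)
    (hmin : ∀ d, d < M → canMakeA k m d arr 0 0 = false) :
    firstFeasible arr k m s = M := by
  induction s with
  | nil => simp at hMs
  | cons d rest ih =>
    rw [firstFeasible, canMakeB_eq]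
    rcases List.mem_cons.mp hMs with h1 | h1
    · subst h1; rw [if_pos hM]
    · have hdM : d < M := (List.pairwise_cons.mp hs).1 M h1
      rw [hmin d hdM, if_neg (by simp)]
      exact ih (List.pairwise_cons.mp hs).2 h1

-- ===== VERDICT (by name: the statement is the Claim_ definition above) =====
theorem minDaysBloom_spec : Claim_equal_minDaysBloom := by
  intro arr k m _ hpre
  unfold Spec_minDaysBloom minDaysBloom minDaysBloom_alt
  by_cases hg : m * k > (arr.length : Int)
  · rw [if_pos hg, if_pos hg]
  · rw [if_neg hg, if_neg hg]
    have harr : arr ≠ [] := by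
      intro he; subst he
      simp only [List.length_nil, Int.natCast_zero, not_lt] at hg
      exact absurd (hpre rfl) (by omega)
    obtain ⟨lo, hlo⟩ : ∃ lo, PySem.List.min? arr (fun x => x) = some lo := by
      cases h : PySem.List.min? arr (fun x => x) with
      | none => rw [PySem.List.min?_eq_none_iff] at h; exact absurd h harr
      | some lo => exact ⟨lo, rfl⟩
    obtain ⟨hi, hhi⟩ : ∃ hi, PySem.List.max? arr (fun x => x) = some hi := by
      cases h : PySem.List.max? arr (fun x => x) with
      | none => rw [PySem.List.max?_eq_none_iff] at h; exact absurd h harr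
      | some hi => exact ⟨hi, rfl⟩
    rw [hlo, hhi]
    show bsLoop arr k m lo hi (-1) = firstFeasible arr k m (PySem.List.sorted (PySem.Set.ofList arr) (fun x => x) false)
    have hlomin := PySem.List.min?_isMin hlo
    have hhimax := PySem.List.max?_isMax hhi
    have hs_pw : (PySem.List.sorted (PySem.Set.ofList arr) (fun x => x) false).Pairwise (· < ·) :=
      PySem.List.sorted_ofList_pairwise_lt arr
    have hs_mem : ∀ x, x ∈ PySem.List.sorted (PySem.Set.ofList arr) (fun x => x) false ↔ x ∈ arr := by
      intro x
      rw [PySem.List.mem_sorted, PySem.Set.mem_ofList]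
    by_cases hfe : ∃ a ∈ arr, canMakeA k m a arr 0 0 = true
    · -- M := minimal feasible element of arr
      obtain ⟨a0, ha0, ha0f⟩ := hfe
      obtain ⟨M, hMm⟩ : ∃ M, PySem.List.min? (arr.filter (fun a => canMakeA k m a arr 0 0)) (fun x => x) = some M := by
        cases h : PySem.List.min? (arr.filter (fun a => canMakeA k m a arr 0 0)) (fun x => x) with
        | none =>
          rw [PySem.List.min?_eq_none_iff] at h
          exact absurd h (by simp [List.filter_eq_nil_iff]; exact ⟨a0, ha0, ha0f⟩)
        | some M => exact ⟨M, rfl⟩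
      have hMmem := PySem.List.min?_mem hMm
      have hMisMin := PySem.List.min?_isMin hMm
      simp only [List.mem_filter] at hMmem hMisMin
      have hMfeas : canMakeA k m M arr 0 0 = true := hMmem.2
      have hmin : ∀ d, d < M → canMakeA k m d arr 0 0 = false := by
        intro d hdM
        by_contra hc
        rw [Bool.not_eq_false] at hc
        obtain ⟨a, ha, had, haf⟩ := feasible_elem arr k m d hc
        have := hMisMin a ⟨ha, haf⟩
        omega
      rw [bs_min arr k m (hi + 1 - lo).toNat lo hi (-1) M (by omega) (hlomin M hMmem.1) (hhimax M hMmem.1) hMfeas hmin]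
      rw [ff_min arr k m _ M hs_pw ((hs_mem M).mpr hMmem.1) hMfeas hmin]
    · push Not at hfe
      have hnone : ∀ d, canMakeA k m d arr 0 0 = false := by
        intro d
        by_contra hc
        rw [Bool.not_eq_false] at hc
        obtain ⟨a, ha, _, haf⟩ := feasible_elem arr k m d hc
        exact absurd haf (by simpa using hfe a ha)
      rw [bs_none arr k m (hi + 1 - lo).toNat lo hi (-1) (by omega) (fun d _ _ => hnone d)]
      rw [ff_none arr k m _ (fun d _ => hnone d)]
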